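-- pv_equiv track=rewrite | github.com/IgrMd/yandex-algos-training | Тренировки по алгоритмам 5.0/Лекция 3. Множества и словари/A.py | best_playlist
-- ===== SOURCE A (Python) =====
-- def best_playlist(min_index: int, playlists: list[set]):
--     ans = []
--     for song in playlists[min_index]:
--         flag = True
--         for playlist in playlists:
--             if song not in playlist:
--                 flag = False
--                 break
--         if flag:
--             ans.append(song)
--     ans.sort()
--     return ans
-- ===== SOURCE B (Python) =====
-- def best_playlist(min_index: int, playlists: list[set]):
--     n = len(playlists)
--     count = {}
--     for pl in playlists:
--         for s in set(pl):
--             count[s] = count.get(s, 0) + 1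
--     return sorted(s for s in playlists[min_index] if count.get(s, 0) == n)
-- ===== Notes on version B (the rewrite author's own statement) =====
-- stated objective: alternative
-- what changed: Replaces A's per-song nested membership scan with early break by a frequency table built in one flat pass (how many playlists contain each song), then a single filtered pass over playlists[min_index] keeping songs whose count equals len(playlists), sorted at the end.
import Mathlib
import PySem

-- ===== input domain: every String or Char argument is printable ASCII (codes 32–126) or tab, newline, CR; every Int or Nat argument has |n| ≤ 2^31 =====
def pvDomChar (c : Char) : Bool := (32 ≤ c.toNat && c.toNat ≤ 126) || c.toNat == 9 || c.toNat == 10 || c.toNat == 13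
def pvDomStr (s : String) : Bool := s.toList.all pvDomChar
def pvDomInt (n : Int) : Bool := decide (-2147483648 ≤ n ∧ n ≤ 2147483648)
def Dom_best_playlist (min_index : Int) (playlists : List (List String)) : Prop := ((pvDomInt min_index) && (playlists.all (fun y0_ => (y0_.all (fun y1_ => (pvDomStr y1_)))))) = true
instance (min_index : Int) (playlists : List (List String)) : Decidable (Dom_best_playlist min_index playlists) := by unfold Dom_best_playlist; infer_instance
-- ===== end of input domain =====

-- B replaces A's per-song nested membership scan (with break) by a counting pass
-- (how many playlists contain each song) followed by one filtered pass over
-- playlists[min_index]; objective: alternative decomposition, same result.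

-- ===== PORT A =====
-- inner loop of A: 'for playlist in playlists: if song not in playlist: flag = False; break'
def pvAllIn (song : String) : List (List String) → Bool
  | [] => true
  | p :: ps => if !(p.contains song) then false else pvAllIn song ps

def best_playlist (min_index : Int) (playlists : List (List String)) : List String :=
  match PySem.List.pyGet? playlists min_index with
  | none => []  -- unreachable under Pre_ (IndexError in Python)
  | some songs =>
    let ans := songs.foldl (fun ans song =>
      if pvAllIn song playlists then ans ++ [song] else ans) []
    PySem.List.sorted ans (fun x => x) false

-- ===== PORT B =====
def best_playlist_alt (min_index : Int) (playlists : List (List String)) : List String :=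
  let n := playlists.length
  let count := playlists.foldl (fun d pl =>
    (PySem.Set.ofList pl).foldl (fun d s => d.insert s (d.getD s 0 + 1)) d)
    (PySem.Dict.empty : PySem.Dict String Int)
  match PySem.List.pyGet? playlists min_index with
  | none => []  -- unreachable under Pre_
  | some songs =>
    PySem.List.sorted (songs.filter (fun s => count.getD s 0 == (n : Int))) (fun x => x) false

-- ===== PRECONDITION & SPEC =====
-- A raises IndexError iff playlists[min_index] is out of range (Python index rule)
def Pre_best_playlist (min_index : Int) (playlists : List (List String)) : Prop :=
  PySem.Raise.InRange playlists.length min_index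
instance (min_index : Int) (playlists : List (List String)) : Decidable (Pre_best_playlist min_index playlists) := by unfold Pre_best_playlist; infer_instance
def pvWitness_best_playlist : Int × List (List String) := (0, [["a", "b"], ["b"]])

def Spec_best_playlist (min_index : Int) (playlists : List (List String)) (out : List String) : Prop := out = best_playlist_alt min_index playlists
instance (min_index : Int) (playlists : List (List String)) (out : List String) : Decidable (Spec_best_playlist min_index playlists out) := by unfold Spec_best_playlist; infer_instance

-- ===== CLAIM (what is proved, stated in full; the proofs are below) =====
def Claim_equal_best_playlist : Prop := ∀ (min_index : Int) (playlists : List (List String)), Dom_best_playlist min_index playlists → Pre_best_playlist min_index playlists → Spec_best_playlist min_index playlists (best_playlist min_index playlists)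

-- ===== LEMMAS AND PROOFS =====

-- the count dict's value at s = number of playlists containing s
theorem pv_count_getD (pls : List (List String)) (d : PySem.Dict String Int) (s : String) :
    (pls.foldl (fun d pl =>
      (PySem.Set.ofList pl).foldl (fun d s => d.insert s (d.getD s 0 + 1)) d) d).getD s 0
    = d.getD s 0 + (pls.countP (fun pl => decide (s ∈ pl)) : Int) := by
  induction pls generalizing d with
  | nil => simp
  | cons pl ps ih =>
    simp only [List.foldl_cons, ih, PySem.Dict.getD_foldl_insert_add_one, List.countP_cons]
    have hn : (PySem.Set.ofList pl).Nodup := PySem.Set.nodup_ofList pl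
    by_cases h : s ∈ pl
    · have hm : s ∈ PySem.Set.ofList pl := (PySem.Set.mem_ofList pl s).2 h
      have h1 : (PySem.Set.ofList pl).count s = 1 :=
        List.nodup_iff_count_eq_one.mp hn s hm
      simp [h]
      ring
    · have hm : s ∉ PySem.Set.ofList pl := fun hc => h ((PySem.Set.mem_ofList pl s).1 hc)
      have h0 : (PySem.Set.ofList pl).count s = 0 := List.count_eq_zero.2 hm
      simp [h0, h]

theorem pv_allIn_eq (s : String) (pls : List (List String)) :
    pvAllIn s pls = pls.all (fun p => p.contains s) := by
  induction pls with
  | nil => rfl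
  | cons p ps ih =>
    simp only [pvAllIn, List.all_cons, ih]
    by_cases h : p.contains s <;> simp_all

theorem pv_pred_eq (playlists : List (List String)) (s : String) :
    ((playlists.foldl (fun d pl =>
        (PySem.Set.ofList pl).foldl (fun d s => d.insert s (d.getD s 0 + 1)) d)
        (PySem.Dict.empty : PySem.Dict String Int)).getD s 0 == (playlists.length : Int))
    = pvAllIn s playlists := by
  rw [pv_count_getD, pv_allIn_eq]
  simp only [PySem.Dict.getD_empty, zero_add]
  by_cases h : ∀ p ∈ playlists, s ∈ p
  · have hc : playlists.countP (fun pl => decide (s ∈ pl)) = playlists.length :=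
      List.countP_eq_length.2 (by intro p hp; simpa using h p hp)
    rw [hc]
    simp only [beq_self_eq_true]
    symm
    simp only [List.all_eq_true]
    intro x hx
    simpa using h x hx
  · have hne : playlists.countP (fun pl => decide (s ∈ pl)) ≠ playlists.length := by
      intro he
      exact h (fun p hp => by simpa using List.countP_eq_length.1 he p hp)
    have hL : ((playlists.countP (fun pl => decide (s ∈ pl)) : Int) == (playlists.length : Int)) = false := by
      simp only [beq_eq_false_iff_ne, ne_eq, Int.natCast_inj]
      exact hne
    have hR : playlists.all (fun p => p.contains s) = false := by
      simp only [List.all_eq_false]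
      rw [not_forall] at h
      simp only [not_forall] at h
      obtain ⟨p, hp, hs⟩ := h
      exact ⟨p, hp, by simpa using hs⟩
    rw [hL, hR]

-- ===== VERDICT (by name: the statement is the Claim_ definition above) =====
theorem best_playlist_spec : Claim_equal_best_playlist := by
  intro min_index playlists _ _
  unfold Spec_best_playlist best_playlist best_playlist_alt
  cases h : PySem.List.pyGet? playlists min_index with
  | none => rfl
  | some songs =>
    simp only [PySem.List.foldl_append_if_eq_filter, List.nil_append]
    congr 1
    apply List.filter_congr
    intro s _
    exact (pv_pred_eq playlists s).symm
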